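-- pv_equiv track=rewrite | github.com/ItzPlausible/c3-did-method | C3-Dev/sbt-did-contracts/deployment/generate_addresses.py | convertbits
-- ===== SOURCE A (Python) =====
-- def convertbits(data, frombits, tobits, pad=True):
--     acc = 0
--     bits = 0
--     ret = []
--     maxv = (1 << tobits) - 1
--     for value in data:
--         acc = (acc << frombits) | value
--         bits += frombits
--         while bits >= tobits:
--             bits -= tobits
--             ret.append((acc >> bits) & maxv)
--     if pad:
--         if bits:
--             ret.append((acc << (tobits - bits)) & maxv)
--     elif bits >= frombits or ((acc << (tobits - bits)) & maxv):
--         return None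
--     return ret
-- ===== SOURCE B (Python) =====
-- def convertbits(data, frombits, tobits, pad=True):
--     """Staged re-implementation: pass 1 records the running big-int accumulator
--     after each input value; pass 2 emits each complete output group by a
--     closed-form slice of the right recorded accumulator, with the group
--     boundaries given by floor division instead of a running bit counter."""
--     maxv = (1 << tobits) - 1
--     prefix = []
--     acc = 0
--     for value in data:
--         acc = (acc << frombits) | value
--         prefix.append(acc)
--     out = []
--     for k, a in enumerate(prefix, 1):
--         for i in range(((k - 1) * frombits) // tobits, (k * frombits) // tobits):
--             out.append((a >> (k * frombits - (i + 1) * tobits)) & maxv)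
--     leftover = (len(data) * frombits) % tobits
--     if pad:
--         if leftover:
--             out.append((acc << (tobits - leftover)) & maxv)
--         return out
--     if leftover >= frombits or ((acc << (tobits - leftover)) & maxv):
--         return None
--     return out
-- ===== Notes on version B (the rewrite author's own statement) =====
-- stated objective: alternative
-- what changed: B splits A's single pass with a running bit counter and inner while-loop into two staged passes: pass 1 records the running accumulator after each input value, pass 2 emits every complete output group by a closed-form slice of the recorded accumulator, with group boundaries given by floor division instead of a bit counter.
-- outside the precondition, e.g. on convertbits([], 5, 0, True): A returns [], B raises ZeroDivisionError; on convertbits([], 5, 0, False): A returns [], B raises ZeroDivisionError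
import Mathlib
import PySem

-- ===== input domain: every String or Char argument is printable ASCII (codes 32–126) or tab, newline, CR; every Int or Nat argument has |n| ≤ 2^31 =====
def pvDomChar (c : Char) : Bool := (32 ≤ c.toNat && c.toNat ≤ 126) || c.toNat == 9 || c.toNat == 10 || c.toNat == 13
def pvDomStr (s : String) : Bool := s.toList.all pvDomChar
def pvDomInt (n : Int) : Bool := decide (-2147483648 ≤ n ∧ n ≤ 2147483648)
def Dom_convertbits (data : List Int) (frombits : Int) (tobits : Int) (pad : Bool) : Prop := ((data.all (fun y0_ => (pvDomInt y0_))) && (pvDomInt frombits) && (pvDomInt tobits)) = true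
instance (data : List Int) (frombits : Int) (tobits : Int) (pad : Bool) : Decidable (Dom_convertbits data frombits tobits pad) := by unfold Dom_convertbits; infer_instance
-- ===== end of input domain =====

-- B replaces A's single pass with a running bit counter and inner while-loop by two staged
-- passes: record the running accumulator after each value, then emit every complete output
-- group by a closed-form slice with floor-division group boundaries (objective: alternative).

-- ===== PORT A =====
-- inner `while bits >= tobits` loop of A, fuelled (Python diverges when tobits ≤ 0 and the loop
-- is entered; inside Pre_ the fuel `bits.toNat` is enough and the `.toNat` on the shift is exact
-- because the shift amount is nonnegative there)
def convWhileA (tobits maxv acc : Int) : Nat → Int → List Int → Int × List Int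
  | 0, bits, ret => (bits, ret)
  | fuel+1, bits, ret =>
    if bits ≥ tobits then
      convWhileA tobits maxv acc fuel (bits - tobits)
        (ret ++ [PySem.Int.band (acc >>> (bits - tobits).toNat) maxv])
    else (bits, ret)

-- loop body of A's `for value in data`
def convStepA (frombits tobits maxv : Int) (st : Int × Int × List Int) (value : Int) :
    Int × Int × List Int :=
  let acc := PySem.Int.bor (st.1 <<< frombits.toNat) value
  let bits := st.2.1 + frombits
  let r := convWhileA tobits maxv acc bits.toNat bits st.2.2
  (acc, r.1, r.2)

def convertbits (data : List Int) (frombits : Int) (tobits : Int) (pad : Bool) :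
    Option (List Int) :=
  let maxv : Int := ((1:Int) <<< tobits.toNat) - 1
  let st := data.foldl (convStepA frombits tobits maxv) ((0:Int), (0:Int), ([]:List Int))
  if pad then
    if st.2.1 ≠ 0 then
      some (st.2.2 ++ [PySem.Int.band (st.1 <<< (tobits - st.2.1).toNat) maxv])
    else some st.2.2
  else
    if st.2.1 ≥ frombits ∨ PySem.Int.band (st.1 <<< (tobits - st.2.1).toNat) maxv ≠ 0 then none
    else some st.2.2

-- ===== PORT B =====
-- B pass 1: record the running accumulator after each value (`prefix.append(acc)`);
-- `frombits.toNat` is exact because inside Pre_ the loop only runs when 0 ≤ frombits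
def convStepB1 (frombits : Int) (st : Int × List Int) (value : Int) : Int × List Int :=
  let acc := PySem.Int.bor (st.1 <<< frombits.toNat) value
  (acc, st.2 ++ [acc])

def convPrefixB (frombits : Int) (data : List Int) : Int × List Int :=
  data.foldl (convStepB1 frombits) ((0:Int), ([]:List Int))

-- B pass 2, body of `for k, a in enumerate(prefix, 1)` with its inner `for i in range(lo, hi)`
def convEmitStep (frombits tobits maxv : Int) (out : List Int) (ka : Int × Int) : List Int :=
  out ++ (PySem.List.pyRange (PySem.Int.floordiv ((ka.1 - 1) * frombits) tobits)
            (PySem.Int.floordiv (ka.1 * frombits) tobits) 1).map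
      (fun i => PySem.Int.band (ka.2 >>> (ka.1 * frombits - (i + 1) * tobits).toNat) maxv)

def convEmitB (frombits tobits maxv : Int) (p : List Int) : List Int :=
  (PySem.List.enumerate p 1).foldl (convEmitStep frombits tobits maxv) []

def convertbits_alt (data : List Int) (frombits : Int) (tobits : Int) (pad : Bool) :
    Option (List Int) :=
  let maxv : Int := ((1:Int) <<< tobits.toNat) - 1
  let p := convPrefixB frombits data
  let out := convEmitB frombits tobits maxv p.2
  let leftover := PySem.Int.mod ((data.length : Int) * frombits) tobits
  if pad then
    if leftover ≠ 0 then
      some (out ++ [PySem.Int.band (p.1 <<< (tobits - leftover).toNat) maxv])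
    else some out
  else
    if leftover ≥ frombits ∨ PySem.Int.band (p.1 <<< (tobits - leftover).toNat) maxv ≠ 0 then
      none
    else some out

-- ===== PRECONDITION & SPEC =====
-- A raises ValueError on a negative shift amount (tobits < 0 at `1 << tobits`; frombits < 0 at
-- `acc << frombits` whenever data is nonempty) and diverges for tobits = 0 on nonempty data;
-- for tobits = 0 with empty data A returns [] but B's floor divisions by tobits raise
-- ZeroDivisionError, so that corner is excluded too (see the cite).
def Pre_convertbits (data : List Int) (frombits : Int) (tobits : Int) (pad : Bool) : Prop :=
  (0 ≤ frombits ∨ data = []) ∧ 1 ≤ tobits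
instance (data : List Int) (frombits : Int) (tobits : Int) (pad : Bool) :
    Decidable (Pre_convertbits data frombits tobits pad) := by
  unfold Pre_convertbits; infer_instance

def pvWitness_convertbits : List Int × Int × Int × Bool := ([3, 7, 21], 5, 8, true)

def Spec_convertbits (data : List Int) (frombits : Int) (tobits : Int) (pad : Bool)
    (out : Option (List Int)) : Prop := out = convertbits_alt data frombits tobits pad
instance (data : List Int) (frombits : Int) (tobits : Int) (pad : Bool) (out : Option (List Int)) :
    Decidable (Spec_convertbits data frombits tobits pad out) := by
  unfold Spec_convertbits; infer_instance

-- ===== CLAIM (what is proved, stated in full; the proofs are below) =====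
def Claim_equal_convertbits : Prop := ∀ (data : List Int) (frombits : Int) (tobits : Int) (pad : Bool), Dom_convertbits data frombits tobits pad → Pre_convertbits data frombits tobits pad → Spec_convertbits data frombits tobits pad (convertbits data frombits tobits pad)

-- ===== LEMMAS AND PROOFS =====

-- A's inner while-loop in closed form: it emits the complete groups top-down
lemma pvWhileA_eq (t maxv acc : Int) (ht : 0 < t) :
    ∀ (fuel : Nat) (b : Int) (ret : List Int), 0 ≤ b → (b / t).toNat ≤ fuel →
    convWhileA t maxv acc fuel b ret =
      (b % t, ret ++ (List.range (b / t).toNat).reverse.map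
          (fun (j : Nat) => PySem.Int.band (acc >>> ((b % t) + (j:Int) * t).toNat) maxv)) := by
  intro fuel
  induction fuel with
  | zero =>
    intro b ret hb hq
    have h0 : 0 ≤ b / t := Int.ediv_nonneg hb ht.le
    have hq0 : b / t = 0 := by omega
    have hbt : b < t := by
      by_contra hcon
      have : 1 ≤ b / t := (Int.le_ediv_iff_mul_le ht).mpr (by omega)
      omega
    simp [convWhileA, hq0, Int.emod_eq_of_lt hb hbt]
  | succ fuel ih =>
    intro b ret hb hq
    by_cases hge : b ≥ t
    · have hq1 : 1 ≤ b / t := (Int.le_ediv_iff_mul_le ht).mpr (by omega)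
      have hsub : (b - t) / t = b / t - 1 := by
        rw [show b - t = b + t * (-1) by ring, Int.add_mul_ediv_left _ _ (by omega : t ≠ 0)]
        ring
      have hsubm : (b - t) % t = b % t := Int.sub_emod_right b t
      have hfuel : ((b - t) / t).toNat ≤ fuel := by rw [hsub]; omega
      have hqpos : 1 ≤ (b / t).toNat := by omega
      have hmod := Int.emod_add_ediv b t
      rw [show convWhileA t maxv acc (fuel+1) b ret =
          convWhileA t maxv acc fuel (b - t)
            (ret ++ [PySem.Int.band (acc >>> (b - t).toNat) maxv]) by
        simp [convWhileA, hge]]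
      rw [ih (b - t) _ (by omega) hfuel, hsubm, hsub]
      simp only [Prod.mk.injEq, true_and]
      have hqn : (b / t - 1).toNat = (b / t).toNat - 1 := by omega
      rw [hqn]
      conv_rhs => rw [show (b / t).toNat = ((b / t).toNat - 1) + 1 by omega]
      have hc : (((b / t).toNat - 1 : Nat) : Int) = b / t - 1 := by omega
      rw [show b - t = b % t + (((b / t).toNat - 1 : Nat) : Int) * t by
        rw [hc]; linear_combination -hmod]
      rw [List.range_succ, List.reverse_append, List.reverse_singleton,
        List.singleton_append, List.map_cons, List.append_assoc, List.singleton_append]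
    · have hbt : b < t := by omega
      have hq0 : b / t = 0 := Int.ediv_eq_zero_of_lt hb hbt
      simp [convWhileA, hge, hq0, Int.emod_eq_of_lt hb hbt]

-- B's pass 1 records one accumulator per input value
lemma pvPrefixLen (f : Int) :
    ∀ (l : List Int) (s : Int × List Int),
      ((l.foldl (convStepB1 f) s).2).length = s.2.length + l.length := by
  intro l
  induction l with
  | nil => intro s; simp
  | cons v rest ih =>
    intro s
    rw [List.foldl_cons, ih]
    simp [convStepB1]
    omega

-- main invariant: A's fold state is B's (final accumulator, total-bits mod, staged emission)
lemma pvMain (f t maxv : Int) (hf : 0 ≤ f) (ht : 1 ≤ t) (data : List Int) :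
    data.foldl (convStepA f t maxv) ((0:Int), (0:Int), ([]:List Int)) =
      ((convPrefixB f data).1,
       ((data.length : Int) * f) % t,
       convEmitB f t maxv (convPrefixB f data).2) := by
  have ht' : (0:Int) < t := by omega
  induction data using List.reverseRecOn with
  | nil =>
    simp [convPrefixB, convEmitB, PySem.List.enumerate_nil]
  | append_singleton init v ih =>
    have hP : convPrefixB f (init ++ [v]) =
        convStepB1 f (convPrefixB f init) v := by
      simp [convPrefixB, List.foldl_append]
    set aI := (convPrefixB f init).1 with haI
    set P := (convPrefixB f init).2 with hPdef
    have hPlen : P.length = init.length := by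
      have := pvPrefixLen f init ((0:Int), ([]:List Int))
      simpa [convPrefixB, hPdef] using this
    set acc' := PySem.Int.bor (aI <<< f.toNat) v with hacc'
    set n : Int := (init.length : Int) with hn
    set m : Int := n * f with hm
    set K : Int := (n + 1) * f with hK
    set lo : Int := m / t with hlo
    set hi : Int := K / t with hhi
    set b : Int := m % t + f with hb
    have hmd := Int.emod_add_ediv m t
    have hKd := Int.emod_add_ediv K t
    have hb0 : 0 ≤ b := by
      have := Int.emod_nonneg m (by omega : t ≠ 0); omega
    have hbK : b = K + t * (-lo) := by
      have h := Int.emod_add_ediv m t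
      rw [hm] at h
      rw [hb, hK, hlo, hm]; linear_combination h
    have hdiv : b / t = hi - lo := by
      rw [hbK, Int.add_mul_ediv_left _ _ (by omega : t ≠ 0)]; omega
    have hmod : b % t = K % t := by
      rw [hbK, Int.add_mul_emod_self_left]
    have hfuel : (b / t).toNat ≤ b.toNat := Int.toNat_le_toNat (Int.ediv_le_self t hb0)
    -- LHS: A's step on the inductive state
    rw [List.foldl_append, ih, List.foldl_cons, List.foldl_nil]
    have hstepA : convStepA f t maxv (aI, m % t, convEmitB f t maxv P) v =
        (acc', b % t, convEmitB f t maxv P ++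
          (List.range (b / t).toNat).reverse.map
            (fun (j : Nat) => PySem.Int.band (acc' >>> ((b % t) + (j:Int) * t).toNat) maxv)) := by
      simp only [convStepA]
      rw [← hacc', show m % t + f = b from rfl, pvWhileA_eq t maxv acc' ht' b.toNat b _ hb0 hfuel]
    rw [hstepA]
    -- RHS: B's recorded prefix gains one accumulator, the emission one block
    have e1 : (1 + n - 1) * f = m := by rw [hm]; ring
    have e2 : (1 + n) * f = K := by rw [hK]; ring
    have hE : convEmitB f t maxv (convPrefixB f (init ++ [v])).2 =
        convEmitB f t maxv P ++
          (PySem.List.pyRange lo hi 1).map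
            (fun i => PySem.Int.band (acc' >>> (K - (i + 1) * t).toNat) maxv) := by
      rw [hP]
      show convEmitB f t maxv (P ++ [acc']) = _
      rw [convEmitB, PySem.List.enumerate_append, PySem.List.enumerate_cons,
        PySem.List.enumerate_nil, List.foldl_append, List.foldl_cons, List.foldl_nil]
      rw [show (PySem.List.enumerate P 1).foldl (convEmitStep f t maxv) [] =
        convEmitB f t maxv P from rfl]
      simp only [convEmitStep, hPlen, ← hn,
        PySem.Int.floordiv_eq_ediv_of_pos ht', e1, e2, ← hlo, ← hhi]
    rw [hE]
    have hfst : (convPrefixB f (init ++ [v])).1 = acc' := by rw [hP]; rfl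
    have hlen : (((init ++ [v]).length : Int)) * f % t = b % t := by
      have h1 : (((init ++ [v]).length : Int)) = n + 1 := by
        rw [hn]; push_cast; simp
      rw [h1, ← hK]; exact hmod.symm
    rw [hfst, hlen]
    -- remaining: the two emitted blocks coincide element by element
    refine congrArg _ (congrArg _ (congrArg _ ?_))
    rw [PySem.List.pyRange_one, List.map_map]
    have hq : (hi - lo).toNat = (b / t).toNat := by rw [hdiv]
    rw [hq]
    apply List.ext_getElem
    · simp
    · intro i h1 h2
      have hiq : i < (b / t).toNat := by simpa using h1
      simp only [List.getElem_map, List.getElem_reverse,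
        List.length_range, List.getElem_range, Function.comp]
      have hcast : (((b / t).toNat - 1 - i : Nat) : Int) = b / t - 1 - (i : Int) := by omega
      have hbmod : b % t = K - t * hi := by
        rw [hmod, hhi]; linear_combination hKd
      have hsh : (b % t) + (((b / t).toNat - 1 - i : Nat) : Int) * t
          = K - (lo + (i : Int) + 1) * t := by
        rw [hcast, hbmod, hdiv]; ring
      rw [hsh]

-- ===== VERDICT (by name: the statement is the Claim_ definition above) =====
theorem convertbits_spec : Claim_equal_convertbits := by
  intro data f t pad _hdom hpre
  obtain ⟨hfe, ht⟩ := hpre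
  have ht' : (0:Int) < t := by omega
  simp only [Spec_convertbits, convertbits, convertbits_alt]
  rcases hfe with hf | rfl
  · rw [pvMain f t (((1:Int) <<< t.toNat) - 1) hf ht data,
      PySem.Int.mod_eq_emod_of_pos ht']
  · simp [convPrefixB, convEmitB, PySem.List.enumerate_nil,
      PySem.Int.mod_eq_emod_of_pos ht']
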